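-- pv_equiv track=rewrite | github.com/sophia201552/otherAutoTool | shenceTest/run_zuke_test_shence.py | deleteRepeate
-- ===== SOURCE A (Python) =====
-- def deleteRepeate(expected):
--     expected1 = []
--     # name=[]
--     for index, i in enumerate(expected):
--         event_name = i.get('event_name')
--         if not expected1:
--             expected1.append(i)
--         else:
--             last_expected1 = expected1[len(expected1) - 1]
--             if event_name == last_expected1.get('event_name'):
--                 for key in i:
--                     if key not in last_expected1.keys():
--                         last_expected1[key] = i[key]
--             else:
--                 expected1.append(i)
--
--     return expected1
-- ===== SOURCE B (Python) =====
-- def deleteRepeate(expected):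
--     n = len(expected)
--     # stage 1: indices where a new run of equal event_name begins
--     starts = [j for j in range(n)
--               if j == 0 or expected[j].get('event_name') != expected[j - 1].get('event_name')]
--     # stage 2: build each output dict fresh, first-occurrence-wins over the run's items
--     result = []
--     for s, e in zip(starts, starts[1:] + [n]):
--         merged = {}
--         for d in expected[s:e]:
--             for key, value in d.items():
--                 merged.setdefault(key, value)
--         result.append(merged)
--     return result
-- ===== Notes on version B (the rewrite author's own statement) =====
-- stated objective: alternative
-- what changed: Replaces A's single accumulator pass (which merges each dict into the mutable last element of the output list) by a two-stage computation: first a list comprehension of run-boundary indices where event_name changes, then one fresh dict per (start, end) segment built by a first-occurrence-wins setdefault fold over the segment's items; B also builds fresh dicts instead of mutating A's input dicts in place (return value is identical).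
import Mathlib
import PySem

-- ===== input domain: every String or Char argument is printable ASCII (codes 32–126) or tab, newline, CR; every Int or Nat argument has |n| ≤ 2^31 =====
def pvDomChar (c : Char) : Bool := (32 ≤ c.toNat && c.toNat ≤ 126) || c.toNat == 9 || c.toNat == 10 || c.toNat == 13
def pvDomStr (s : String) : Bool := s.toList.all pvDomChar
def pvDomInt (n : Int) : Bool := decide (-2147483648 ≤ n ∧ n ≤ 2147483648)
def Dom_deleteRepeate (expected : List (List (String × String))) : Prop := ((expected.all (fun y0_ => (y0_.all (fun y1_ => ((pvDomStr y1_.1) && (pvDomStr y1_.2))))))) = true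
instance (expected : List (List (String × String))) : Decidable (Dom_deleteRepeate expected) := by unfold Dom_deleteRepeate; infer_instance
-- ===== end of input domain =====

-- B replaces A's single-pass accumulator (which merges each dict into the last element of the
-- output list) by a two-stage pass: first compute the index of every run boundary, then build each
-- output dict fresh by a first-occurrence-wins fold over the run's items. Equivalence is about the
-- RETURN value: A mutates the input dicts in place, B builds fresh dicts.

-- 'insert (key, value) unless key is already present' — the body of A's copy loop
-- ('if key not in last: last[key] = i[key]') and of B's 'merged.setdefault(key, value)';
-- dicts are assoc lists in insertion order, lookup = first match.
def setdefaultFold (m d : List (String × String)) : List (String × String) :=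
  d.foldl (fun f kv => if (List.lookup kv.1 f).isSome then f else f ++ [kv]) m

-- ===== PORT A =====

-- body of A's loop over `expected` (expected1 is the accumulator)
def stepA (expected1 : List (List (String × String))) (i : List (String × String)) :
    List (List (String × String)) :=
  let event_name := List.lookup "event_name" i
  match expected1.getLast? with
  | none => expected1 ++ [i]
  | some last =>
      if event_name = List.lookup "event_name" last then
        expected1.dropLast ++ [setdefaultFold last i]
      else
        expected1 ++ [i]

def deleteRepeate (expected : List (List (String × String))) : List (List (String × String)) :=
  expected.foldl stepA []

-- ===== PORT B =====

-- expected[j].get('event_name'); every j used is in range, so getD's default is never read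
def enAt (expected : List (List (String × String))) (j : Nat) : Option String :=
  List.lookup "event_name" (expected.getD j [])

-- stage 1 of Source B: the list-comprehension of run-start indices
def startsOf (expected : List (List (String × String))) : List Nat :=
  (List.range expected.length).filter (fun j => j == 0 || !(enAt expected j == enAt expected (j - 1)))

-- stage 2 of Source B: expected[s:e] with 0 ≤ s ≤ e ≤ n is exactly (drop s).take (e - s);
-- the result loop appending one merged dict per (s, e) pair is the map over zip(starts, starts[1:]+[n])
def deleteRepeate_alt (expected : List (List (String × String))) : List (List (String × String)) :=
  let starts := startsOf expected
  (starts.zip (starts.drop 1 ++ [expected.length])).map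
    (fun se => List.foldl setdefaultFold [] ((expected.drop se.1).take (se.2 - se.1)))

-- ===== PRECONDITION & SPEC =====
-- Pre_ requires each inner assoc list to have pairwise-distinct keys: an assoc list with a
-- duplicated key does not represent any Python dict (dict keys are unique), so no input reachable
-- from Python is excluded — it only pins down the dict representation.
def Pre_deleteRepeate (expected : List (List (String × String))) : Prop :=
  ∀ d ∈ expected, (d.map Prod.fst).Nodup
instance (expected : List (List (String × String))) : Decidable (Pre_deleteRepeate expected) := by
  unfold Pre_deleteRepeate; infer_instance

def pvWitness_deleteRepeate : (List (List (String × String))) :=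
  [[("event_name", "a"), ("x", "1")], [("event_name", "a"), ("y", "2")], [("event_name", "b")]]

def Spec_deleteRepeate (expected : List (List (String × String))) (out : List (List (String × String))) : Prop := out = deleteRepeate_alt expected
instance (expected : List (List (String × String))) (out : List (List (String × String))) : Decidable (Spec_deleteRepeate expected out) := by unfold Spec_deleteRepeate; infer_instance

-- ===== CLAIM (what is proved, stated in full; the proofs are below) =====
def Claim_equal_deleteRepeate : Prop := ∀ (expected : List (List (String × String))), Dom_deleteRepeate expected → Pre_deleteRepeate expected → Spec_deleteRepeate expected (deleteRepeate expected)

-- ===== LEMMAS AND PROOFS =====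

-- ---- A-side: one run of A's loop merges the takeWhile-run into its head ----

-- the copy loop never changes the event_name lookup of a state that already matches l's
lemma lookup_en_fold (xs : List (String × String)) (l s : List (String × String))
    (hs : List.lookup "event_name" s = List.lookup "event_name" l)
    (H : ∀ kv ∈ xs, kv.1 = "event_name" → (List.lookup "event_name" l).isSome) :
    List.lookup "event_name"
      (xs.foldl (fun f kv => if (List.lookup kv.1 f).isSome then f else f ++ [kv]) s)
      = List.lookup "event_name" l := by
  induction xs generalizing s with
  | nil => simpa using hs
  | cons kv xs ih =>
      simp only [List.foldl_cons]
      by_cases hin : (List.lookup kv.1 s).isSome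
      · rw [if_pos hin]
        exact ih s hs (fun a ha h => H a (List.mem_cons_of_mem _ ha) h)
      · rw [if_neg hin]
        have hne : kv.1 ≠ "event_name" := by
          intro h
          exact hin (by rw [h, hs]; exact H kv (List.mem_cons_self) h)
        apply ih
        · rw [List.lookup_append]
          have hnone : List.lookup "event_name" [kv] = none := by
            rw [List.lookup_eq_none_iff]
            intro p hp
            rcases List.mem_singleton.mp hp with rfl
            simpa [bne_iff_ne] using Ne.symm hne
          rw [hnone, Option.or_none, hs]
        · exact fun a ha h => H a (List.mem_cons_of_mem _ ha) h

-- merging a same-key dict keeps the event_name lookup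
lemma lookup_en_merge (l x : List (String × String))
    (h : List.lookup "event_name" x = List.lookup "event_name" l) :
    List.lookup "event_name" (setdefaultFold l x) = List.lookup "event_name" l := by
  apply lookup_en_fold x l l rfl
  intro kv hkv hk
  cases hsome : List.lookup "event_name" l with
  | some v => rfl
  | none =>
      exfalso
      have hx : List.lookup "event_name" x = none := by rw [h, hsome]
      have := List.lookup_eq_none_iff.mp hx kv hkv
      rw [hk] at this
      simp at this

-- A's loop never touches elements before the last: a prefix can be pulled out
lemma stepA_shift (xs : List (List (String × String)))
    (acc : List (List (String × String))) (l : List (String × String)) :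
    List.foldl stepA (acc ++ [l]) xs = acc ++ List.foldl stepA [l] xs := by
  induction xs generalizing acc l with
  | nil => simp
  | cons x xs ih =>
      simp only [List.foldl_cons]
      by_cases h : List.lookup "event_name" x = List.lookup "event_name" l
      · have h1 : stepA (acc ++ [l]) x = acc ++ [setdefaultFold l x] := by
          simp [stepA, h]
        have h2 : stepA [l] x = [setdefaultFold l x] := by
          simp [stepA, h]
        rw [h1, h2, ih]
      · have h1 : stepA (acc ++ [l]) x = (acc ++ [l]) ++ [x] := by
          simp [stepA, h]
        have h2 : stepA [l] x = [l] ++ [x] := by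
          simp [stepA, h]
        rw [h1, h2, ih, ih]
        simp

-- one run of A's loop = head-merge of the takeWhile-run, then a fresh start on the rest
lemma stepA_run (xs : List (List (String × String))) (l : List (String × String)) :
    List.foldl stepA [l] xs =
      ((xs.takeWhile (fun x => List.lookup "event_name" x == List.lookup "event_name" l)).foldl
          setdefaultFold l)
        :: List.foldl stepA []
            (xs.dropWhile (fun x => List.lookup "event_name" x == List.lookup "event_name" l)) := by
  induction xs generalizing l with
  | nil => simp
  | cons x xs ih =>
      by_cases h : List.lookup "event_name" x = List.lookup "event_name" l
      · have hb : (List.lookup "event_name" x == List.lookup "event_name" l) = true := by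
          simp [h]
        have h2 : stepA [l] x = [setdefaultFold l x] := by simp [stepA, h]
        have hkey : List.lookup "event_name" (setdefaultFold l x) = List.lookup "event_name" l :=
          lookup_en_merge l x h
        have hpred :
            (fun y => List.lookup "event_name" y == List.lookup "event_name" (setdefaultFold l x))
              = (fun y => List.lookup "event_name" y == List.lookup "event_name" l) := by
          funext y; rw [hkey]
        simp only [List.foldl_cons, h2, List.takeWhile_cons, List.dropWhile_cons, hb]
        rw [ih (setdefaultFold l x), hpred]
        simp
      · have hb : (List.lookup "event_name" x == List.lookup "event_name" l) = false := by
          simp [h]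
        have h2 : stepA [l] x = [l] ++ [x] := by simp [stepA, h]
        have hx : stepA [] x = [x] := by simp [stepA]
        simp only [List.foldl_cons, h2, List.takeWhile_cons, List.dropWhile_cons, hb,
          Bool.false_eq_true, if_false, List.foldl_nil]
        rw [stepA_shift xs [l] x, hx]
        simp

-- ---- B-side: the staged boundary/segment computation splits off the first run ----

-- setdefault into an empty dict rebuilds a duplicate-free dict unchanged
lemma setdefaultFold_fresh (d : List (String × String)) :
    ∀ (acc : List (String × String)), (d.map Prod.fst).Nodup →
    (∀ kv ∈ d, List.lookup kv.1 acc = none) → setdefaultFold acc d = acc ++ d := by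
  induction d with
  | nil => intro acc _ _; simp [setdefaultFold]
  | cons kv d ih =>
      intro acc hnd h
      have h0 : List.lookup kv.1 acc = none := h kv List.mem_cons_self
      have hstep : setdefaultFold acc (kv :: d) = setdefaultFold (acc ++ [kv]) d := by
        simp [setdefaultFold, h0]
      rw [hstep, ih (acc ++ [kv])]
      · simp
      · exact (List.nodup_cons.mp (by simpa using hnd)).2
      · intro kv' hkv'
        rw [List.lookup_append, h kv' (List.mem_cons_of_mem _ hkv'), Option.none_or]
        rw [List.lookup_eq_none_iff]
        intro p hp
        rw [List.mem_singleton.mp hp]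
        have : kv.1 ∉ d.map Prod.fst := (List.nodup_cons.mp (by simpa using hnd)).1
        have hne : kv'.1 ≠ kv.1 := by
          intro he
          exact this (he ▸ List.mem_map_of_mem hkv')
        simpa [bne_iff_ne] using hne

lemma setdefaultFold_nil_self (d : List (String × String)) (hd : (d.map Prod.fst).Nodup) :
    setdefaultFold [] d = d := by
  simpa using setdefaultFold_fresh d [] hd (by simp)

-- enAt of an append, both sides
lemma enAt_append_left (r t : List (List (String × String))) (j : Nat) (h : j < r.length) :
    enAt (r ++ t) j = enAt r j := by
  unfold enAt; rw [List.getD_append r t [] j h]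

lemma enAt_append_right (r t : List (List (String × String))) (j : Nat) :
    enAt (r ++ t) (r.length + j) = enAt t j := by
  unfold enAt
  rw [List.getD_append_right r t [] (r.length + j) (Nat.le_add_right _ _),
    Nat.add_sub_cancel_left]

lemma enAt_run (r : List (List (String × String))) (j : Nat) (h : j < r.length)
    (hrun : ∀ x ∈ r, List.lookup "event_name" x = enAt r 0) :
    enAt r j = enAt r 0 := by
  unfold enAt
  rw [List.getD_eq_getElem r [] h]
  exact hrun r[j] (List.getElem_mem h)

lemma startsOf_shift (r t : List (List (String × String))) (hr : r ≠ [])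
    (hrun : ∀ x ∈ r, List.lookup "event_name" x = enAt r 0)
    (ht : t ≠ [] → enAt t 0 ≠ enAt r 0) :
    startsOf (r ++ t) = 0 :: (startsOf t).map (r.length + ·) := by
  have hL : 0 < r.length := List.length_pos_iff.mpr hr
  unfold startsOf
  rw [List.length_append, List.range_add, List.filter_append]
  have hpart1 : (List.range r.length).filter
      (fun j => j == 0 || !(enAt (r ++ t) j == enAt (r ++ t) (j - 1))) = [0] := by
    obtain ⟨m, hm⟩ : ∃ m, r.length = 1 + m := ⟨r.length - 1, by omega⟩
    rw [hm, List.range_add]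
    rw [List.filter_append]
    have h1 : (List.range 1).filter
        (fun j => j == 0 || !(enAt (r ++ t) j == enAt (r ++ t) (j - 1))) = [0] := by
      simp [List.range_one]
    rw [h1]
    have h2 : (List.map (1 + ·) (List.range m)).filter
        (fun j => j == 0 || !(enAt (r ++ t) j == enAt (r ++ t) (j - 1))) = [] := by
      rw [List.filter_map]
      rw [List.filter_eq_nil_iff.mpr, List.map_nil]
      intro j hj
      have hjm : j < m := List.mem_range.mp hj
      simp only [Function.comp]
      have hlt : 1 + j < r.length := by omega
      have hlt' : 1 + j - 1 < r.length := by omega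
      rw [enAt_append_left _ _ _ hlt, enAt_append_left _ _ _ hlt']
      rw [enAt_run r (1 + j) hlt hrun, enAt_run r (1 + j - 1) hlt' hrun]
      simp
    rw [h2, List.append_nil]
  rw [hpart1]
  have hpart2 : (List.map (r.length + ·) (List.range t.length)).filter
      (fun j => j == 0 || !(enAt (r ++ t) j == enAt (r ++ t) (j - 1)))
      = List.map (r.length + ·)
          ((List.range t.length).filter (fun j => j == 0 || !(enAt t j == enAt t (j - 1)))) := by
    rw [List.filter_map]
    congr 1
    apply List.filter_congr
    intro j hj
    have hjT : j < t.length := List.mem_range.mp hj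
    have htne : t ≠ [] := by intro h; rw [h] at hjT; simp at hjT
    simp only [Function.comp]
    have hz : ((r.length + j == 0) = false) := by
      simp only [beq_eq_false_iff_ne, ne_eq]
      omega
    rw [hz]
    cases j with
    | zero =>
        have e1 : enAt (r ++ t) (r.length + 0) = enAt t 0 := enAt_append_right r t 0
        have hlt' : r.length + 0 - 1 < r.length := by omega
        have e2 : enAt (r ++ t) (r.length + 0 - 1) = enAt r 0 := by
          rw [enAt_append_left _ _ _ hlt']; exact enAt_run r _ hlt' hrun
        rw [e1, e2]
        simp only [beq_self_eq_true]
        have := ht htne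
        simp [this]
    | succ k =>
        have e1 : enAt (r ++ t) (r.length + (k + 1)) = enAt t (k + 1) := enAt_append_right r t (k + 1)
        have e2 : enAt (r ++ t) (r.length + (k + 1) - 1) = enAt t k := by
          have : r.length + (k + 1) - 1 = r.length + k := by omega
          rw [this]; exact enAt_append_right r t k
        rw [e1, e2]
        simp
  rw [hpart2]
  rfl

-- a nonempty list's start indices begin with 0
lemma startsOf_ne_nil (t : List (List (String × String))) (ht : t ≠ []) :
    ∃ s', startsOf t = 0 :: s' := by
  obtain ⟨h, t', rfl⟩ := List.exists_cons_of_ne_nil ht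
  refine ⟨((List.range t'.length).map Nat.succ).filter
    (fun j => j == 0 || !(enAt (h :: t') j == enAt (h :: t') (j - 1))), ?_⟩
  unfold startsOf
  rw [List.length_cons, List.range_succ_eq_map, List.filter_cons]
  simp

lemma alt_run_split (r t : List (List (String × String))) (hr : r ≠ [])
    (hrun : ∀ x ∈ r, List.lookup "event_name" x = enAt r 0)
    (ht : t ≠ [] → enAt t 0 ≠ enAt r 0) :
    deleteRepeate_alt (r ++ t) = (List.foldl setdefaultFold [] r) :: deleteRepeate_alt t := by
  have hshift := startsOf_shift r t hr hrun ht
  by_cases htn : t = []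
  · subst htn
    rw [List.append_nil] at hshift ⊢
    have h0 : startsOf ([] : List (List (String × String))) = [] := rfl
    rw [h0, List.map_nil] at hshift
    have halt : deleteRepeate_alt ([] : List (List (String × String))) = [] := rfl
    rw [halt]
    unfold deleteRepeate_alt
    rw [hshift]
    simp
  · obtain ⟨s', hs⟩ := startsOf_ne_nil t htn
    simp only [deleteRepeate_alt, hshift, hs]
    simp only [List.map_cons, List.drop_one, List.tail_cons, List.length_append]
    simp only [List.cons_append, List.zip_cons_cons, List.map_cons]
    congr 1
    · -- first segment is r itself
      simp [List.take_left']
    · -- remaining segments are t's segments shifted by r.length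
      have hmap1 : (r.length + 0) :: List.map (fun x => r.length + x) s'
          = List.map (fun x => r.length + x) (0 :: s') := by simp
      have hmap2 : List.map (fun x => r.length + x) s' ++ [r.length + t.length]
          = List.map (fun x => r.length + x) (s' ++ [t.length]) := by simp
      rw [hmap1, hmap2, List.zip_map, List.map_map]
      apply List.map_congr_left
      intro ab hab
      simp only [Function.comp, Prod.map]
      have h1 : r.length + ab.2 - (r.length + ab.1) = ab.2 - ab.1 := by omega
      have h2 : (r ++ t).drop (r.length + ab.1) = t.drop ab.1 :=
        List.drop_length_add_append ab.1
      simp only [h1, h2]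

-- ---- the two decompositions agree ----

lemma main_eq : ∀ (n : Nat) (xs : List (List (String × String))), xs.length ≤ n →
    Pre_deleteRepeate xs → List.foldl stepA [] xs = deleteRepeate_alt xs := by
  intro n
  induction n with
  | zero =>
      intro xs h _
      have : xs = [] := List.eq_nil_of_length_eq_zero (Nat.le_zero.mp h)
      subst this
      rfl
  | succ n ih =>
      intro xs h hpre
      match xs with
      | [] => rfl
      | d :: rest =>
          have h0 : List.foldl stepA [] (d :: rest) = List.foldl stepA [d] rest := by
            simp [stepA]
          set p : List (String × String) → Bool :=
            fun x => List.lookup "event_name" x == List.lookup "event_name" d with hp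
          have hsplit : (d :: rest.takeWhile p) ++ rest.dropWhile p = d :: rest := by
            simp [List.takeWhile_append_dropWhile]
          have hen0 : enAt (d :: rest.takeWhile p) 0 = List.lookup "event_name" d := rfl
          have hrun : ∀ x ∈ d :: rest.takeWhile p,
              List.lookup "event_name" x = enAt (d :: rest.takeWhile p) 0 := by
            intro x hx
            rw [hen0]
            rcases List.mem_cons.mp hx with rfl | hx'
            · rfl
            · have hpx : p x = true := List.mem_takeWhile_imp hx'
              rw [hp] at hpx
              exact eq_of_beq (by simpa using hpx)
          have ht : rest.dropWhile p ≠ [] →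
              enAt (rest.dropWhile p) 0 ≠ enAt (d :: rest.takeWhile p) 0 := by
            intro hne
            rw [hen0]
            cases hdp : rest.dropWhile p with
            | nil => exact absurd hdp hne
            | cons h' t' =>
                have : p h' = false := by
                  have hh := List.head_dropWhile_not p (l := rest) (by simp [hdp])
                  simp_rw [hdp] at hh
                  simpa using hh
                have : ¬ (List.lookup "event_name" h' = List.lookup "event_name" d) := by
                  intro he
                  rw [hp] at this; simp [he] at this
                simpa [enAt] using this
          have hB : deleteRepeate_alt (d :: rest)
              = (List.foldl setdefaultFold [] (d :: rest.takeWhile p))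
                  :: deleteRepeate_alt (rest.dropWhile p) := by
            rw [← hsplit]
            exact alt_run_split _ _ (by simp) hrun ht
          have hnodup : (d.map Prod.fst).Nodup := hpre d List.mem_cons_self
          have hBmerge : List.foldl setdefaultFold [] (d :: rest.takeWhile p)
              = List.foldl setdefaultFold d (rest.takeWhile p) := by
            rw [List.foldl_cons, setdefaultFold_nil_self d hnodup]
          have hlen : (rest.dropWhile p).length ≤ n := by
            have := List.length_dropWhile_le p rest
            simp only [List.length_cons] at h
            omega
          have hpre' : Pre_deleteRepeate (rest.dropWhile p) := by
            intro x hx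
            exact hpre x (List.mem_cons_of_mem _ ((List.dropWhile_sublist p).subset hx))
          rw [h0, stepA_run rest d, hB, hBmerge, ih _ hlen hpre']

-- ===== VERDICT (by name: the statement is the Claim_ definition above) =====
theorem deleteRepeate_spec : Claim_equal_deleteRepeate := by
  intro expected _ hpre
  show deleteRepeate expected = deleteRepeate_alt expected
  exact main_eq expected.length expected (Nat.le_refl _) hpre
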